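-- pv_equiv track=rewrite | github.com/LifeLongScholar25/My_Public_Repository | Matrix_Stuff/list_fxns.py | first_non_zero_index
-- ===== SOURCE A (Python) =====
-- def row_of_zeros(in_list:list):
--     """Returns True if the row list is full of zeros, and False if
--         the row list has anything but pure zeros."""
--     for entry in in_list:
--         if entry != 0:
--             return False
--     return True #Only is reached if all entries are 0's
--
-- def first_non_zero_index(in_list:list):
--     """Returns the index value of the first non-zero entry in a row list
--         that is not a row of zeroes itself. Python indexing."""
--     if not row_of_zeros(in_list):
--         pos_counter = 0
--         for entry in in_list:
--             if entry == 0: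
--                 pos_counter += 1
--                 #Number preemptively incremented.
--             else:
--                 return pos_counter
--     else: #I.e. a row of zeros.
--         raise RuntimeError ("This function cannot be used with zero rows.")
-- ===== SOURCE B (Python) =====
-- def first_non_zero_index(in_list: list):
--     """Single pass with enumerate: return index of the first non-zero entry."""
--     for i, entry in enumerate(in_list):
--         if entry != 0:
--             return i
--     raise RuntimeError("This function cannot be used with zero rows.")
-- ===== Notes on version B (the rewrite author's own statement) =====
-- stated objective: simpler
-- what changed: Replaces the two-pass structure (row_of_zeros check then a counting scan with an accumulator) with one enumerate loop that returns the index at the first non-zero entry and raises on fall-through; the helper is dropped.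
import Mathlib
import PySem

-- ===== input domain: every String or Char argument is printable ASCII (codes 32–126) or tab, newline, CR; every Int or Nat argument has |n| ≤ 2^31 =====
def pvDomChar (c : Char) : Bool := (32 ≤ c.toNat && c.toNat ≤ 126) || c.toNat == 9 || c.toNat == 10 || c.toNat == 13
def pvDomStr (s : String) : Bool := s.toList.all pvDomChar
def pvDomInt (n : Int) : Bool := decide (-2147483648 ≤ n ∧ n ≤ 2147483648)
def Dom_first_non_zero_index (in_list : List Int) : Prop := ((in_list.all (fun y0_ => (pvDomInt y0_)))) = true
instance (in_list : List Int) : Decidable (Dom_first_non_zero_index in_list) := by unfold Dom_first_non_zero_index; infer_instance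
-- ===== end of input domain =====

-- B replaces A's two-pass structure (all-zeros helper, then a counting scan) with one
-- enumerate-style pass returning the index at the first non-zero entry (objective: simpler).


-- ===== PORT A =====
-- helper row_of_zeros: scans the list, False at the first non-zero entry
def row_of_zeros (in_list : List Int) : Bool :=
  match in_list with
  | [] => true
  | entry :: rest => if entry ≠ 0 then false else row_of_zeros rest

-- A's counting loop: pos_counter incremented on zeros, returned at the first non-zero.
-- The fall-through (unreachable under the ¬ row_of_zeros guard) and the raise branch are
-- excluded by Pre_first_non_zero_index; 0 is a placeholder there.
def fnziLoopA (in_list : List Int) (pos_counter : Int) : Int :=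
  match in_list with
  | [] => 0
  | entry :: rest => if entry = 0 then fnziLoopA rest (pos_counter + 1) else pos_counter

def first_non_zero_index (in_list : List Int) : Int :=
  if ¬ row_of_zeros in_list then fnziLoopA in_list 0
  else 0  -- Python: raise RuntimeError — excluded by Pre_first_non_zero_index

-- ===== PORT B =====
-- single enumerate pass; the empty tail is Python's fall-through raise (excluded by Pre_)
def fnziScan (pairs : List (Int × Int)) : Int :=
  match pairs with
  | [] => 0  -- Python: raise RuntimeError — excluded by Pre_first_non_zero_index
  | (i, entry) :: rest => if entry ≠ 0 then i else fnziScan rest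

def first_non_zero_index_alt (in_list : List Int) : Int :=
  fnziScan (PySem.List.enumerate in_list 0)

-- ===== PRECONDITION & SPEC =====
-- Pre_ excludes exactly the inputs on which A raises RuntimeError (empty or all-zero rows);
-- B raises the same error there.
def Pre_first_non_zero_index (in_list : List Int) : Prop :=
  in_list.any (fun x => x ≠ 0) = true
instance (in_list : List Int) : Decidable (Pre_first_non_zero_index in_list) := by
  unfold Pre_first_non_zero_index; infer_instance

def pvWitness_first_non_zero_index : List Int := [0, 3, 1]

def Spec_first_non_zero_index (in_list : List Int) (out : Int) : Prop := out = first_non_zero_index_alt in_list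
instance (in_list : List Int) (out : Int) : Decidable (Spec_first_non_zero_index in_list out) := by unfold Spec_first_non_zero_index; infer_instance

-- ===== CLAIM (what is proved, stated in full; the proofs are below) =====
def Claim_equal_first_non_zero_index : Prop := ∀ (in_list : List Int), Dom_first_non_zero_index in_list → Pre_first_non_zero_index in_list → Spec_first_non_zero_index in_list (first_non_zero_index in_list)

-- ===== LEMMAS AND PROOFS =====
-- B's scan over enumerate starting at offset c equals A's counting loop with accumulator c,
-- provided the list contains a non-zero entry.
theorem fnziScan_eq_loopA (l : List Int) (c : Int)
    (h : l.any (fun x => x ≠ 0) = true) :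
    fnziScan (PySem.List.enumerate l c) = fnziLoopA l c := by
  induction l generalizing c with
  | nil => simp at h
  | cons x xs ih =>
    simp only [PySem.List.enumerate, fnziScan, fnziLoopA]
    by_cases hx : x = 0
    · simp only [hx] at h ⊢
      simp only [List.any_cons] at h
      simp at h
      simp [ih _ (by simpa using h)]
    · simp [hx]

theorem row_of_zeros_false (l : List Int) (h : l.any (fun x => x ≠ 0) = true) :
    row_of_zeros l = false := by
  induction l with
  | nil => simp at h
  | cons x xs ih =>
    simp only [row_of_zeros]
    by_cases hx : x = 0
    · simp only [List.any_cons] at h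
      simp only [hx] at h
      simp at h
      simp [hx, ih (by simpa using h)]
    · simp [hx]

-- ===== VERDICT (by name: the statement is the Claim_ definition above) =====
theorem first_non_zero_index_spec : Claim_equal_first_non_zero_index := by
  intro l _ hpre
  unfold Spec_first_non_zero_index first_non_zero_index first_non_zero_index_alt
  rw [row_of_zeros_false l hpre]
  simp only [Bool.false_eq_true, not_false_iff, if_true]
  exact (fnziScan_eq_loopA l 0 hpre).symm
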